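-- pv_equiv track=rewrite | github.com/ratataque/advent_of_code | day_15/day_15.py | midle_coord
-- ===== SOURCE A (Python) =====
-- def midle_coord(start, end):
--
--     if start[0] <= end[0]:
--         range_x = [i for i in range(start[0], end[0])]
--     else:
--         range_x = [i for i in range(start[0], end[0], -1)]
--
--     if start[1] <= end[1]:
--         range_y = [i for i in range(start[1], end[1])]
--     else:
--         range_y = [i for i in range(start[1], end[1], -1)]
--
--     coord = []
--     for x, y in zip(range_x, range_y):
--         coord.append((x, y))
--
--     coord.append(end)
--
--     return coord
-- ===== SOURCE B (Python) =====
-- def midle_coord(start, end):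
--     coord = []
--     x, y = start
--     while x != end[0] and y != end[1]:
--         coord.append((x, y))
--         x += 1 if x < end[0] else -1
--         y += 1 if y < end[1] else -1
--     coord.append(end)
--     return coord
-- ===== Notes on version B (the rewrite author's own statement) =====
-- stated objective: alternative
-- what changed: B walks a single moving point (x, y) with a while loop that steps each axis one unit toward end and stops as soon as one axis aligns, instead of materialising two full-length range lists and zipping them; no ranges, no zip, no step count is ever computed.
import Mathlib
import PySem

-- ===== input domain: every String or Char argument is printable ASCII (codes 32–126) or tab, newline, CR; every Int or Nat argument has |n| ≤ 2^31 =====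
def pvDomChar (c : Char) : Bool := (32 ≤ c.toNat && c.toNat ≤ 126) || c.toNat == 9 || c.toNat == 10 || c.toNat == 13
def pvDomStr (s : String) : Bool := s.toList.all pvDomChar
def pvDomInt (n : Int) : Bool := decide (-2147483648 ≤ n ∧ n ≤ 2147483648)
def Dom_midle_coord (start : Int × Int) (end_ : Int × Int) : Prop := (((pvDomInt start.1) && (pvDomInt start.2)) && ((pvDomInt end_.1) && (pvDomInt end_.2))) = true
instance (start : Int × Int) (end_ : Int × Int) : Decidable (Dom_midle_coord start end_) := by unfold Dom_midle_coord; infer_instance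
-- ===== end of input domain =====

-- B walks one moving point with a while loop (stop when an axis aligns) instead of building two range lists and zipping them: an alternative decomposition, same cost.

-- ===== PORT A =====
def midle_coord (start : Int × Int) (end_ : Int × Int) : List (Int × Int) :=
  let range_x : List Int :=
    if start.1 ≤ end_.1 then PySem.List.pyRange start.1 end_.1 1
    else PySem.List.pyRange start.1 end_.1 (-1)
  let range_y : List Int :=
    if start.2 ≤ end_.2 then PySem.List.pyRange start.2 end_.2 1
    else PySem.List.pyRange start.2 end_.2 (-1)
  let coord := (range_x.zip range_y).foldl (fun acc xy => acc ++ [xy]) []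
  coord ++ [end_]

-- ===== PORT B =====
-- the while loop of Source B: step (x, y) one unit toward end per iteration, stop when an axis aligns
-- (fuel is a totality guard only; |e0 - x| + 1 steps always suffice, see pv_walk_eq_canon)
def pvWalk (fuel : Nat) (x y e0 e1 : Int) (coord : List (Int × Int)) : List (Int × Int) :=
  match fuel with
  | 0 => coord
  | fuel + 1 =>
    if x ≠ e0 ∧ y ≠ e1 then
      pvWalk fuel (x + if x < e0 then 1 else -1) (y + if y < e1 then 1 else -1) e0 e1
        (coord ++ [(x, y)])
    else coord

def midle_coord_alt (start : Int × Int) (end_ : Int × Int) : List (Int × Int) :=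
  pvWalk ((end_.1 - start.1).natAbs + 1) start.1 start.2 end_.1 end_.2 [] ++ [end_]

-- ===== PRECONDITION & SPEC =====
def Spec_midle_coord (start : Int × Int) (end_ : Int × Int) (out : List (Int × Int)) : Prop := out = midle_coord_alt start end_
instance (start : Int × Int) (end_ : Int × Int) (out : List (Int × Int)) : Decidable (Spec_midle_coord start end_ out) := by unfold Spec_midle_coord; infer_instance

-- ===== CLAIM (what is proved, stated in full; the proofs are below) =====
def Claim_equal_midle_coord : Prop := ∀ (start : Int × Int) (end_ : Int × Int), Dom_midle_coord start end_ → Spec_midle_coord start end_ (midle_coord start end_)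

-- ===== LEMMAS AND PROOFS =====

-- canonical description of the diagonal segment both programs produce
def pvSx (a b : Int) : Int := if a ≤ b then 1 else -1

def pvCanon (s0 s1 e0 e1 : Int) : List (Int × Int) :=
  (List.range (min (e0 - s0).natAbs (e1 - s1).natAbs)).map
    (fun i : Nat => (s0 + pvSx s0 e0 * (i : Int), s1 + pvSx s1 e1 * (i : Int)))

theorem pv_foldl_append {α : Type} : ∀ (l acc : List α), l.foldl (fun a x => a ++ [x]) acc = acc ++ l := by
  intro l
  induction l with
  | nil => simp
  | cons x xs ih => intro acc; simp [List.foldl, ih]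

theorem pv_zip_range (m n : Nat) :
    (List.range m).zip (List.range n) = (List.range (min m n)).map (fun i => (i, i)) := by
  apply List.ext_getElem
  · simp
  · intro i h1 h2
    simp at h1 ⊢

theorem pv_zip_map_range {α β : Type} (f : Nat → α) (g : Nat → β) (m n : Nat) :
    ((List.range m).map f).zip ((List.range n).map g)
      = (List.range (min m n)).map (fun i => (f i, g i)) := by
  rw [List.zip_map, pv_zip_range]
  simp [Function.comp]

theorem pv_a_eq_canon (s0 s1 e0 e1 : Int) :
    midle_coord (s0, s1) (e0, e1) = pvCanon s0 s1 e0 e1 ++ [(e0, e1)] := by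
  unfold midle_coord pvCanon pvSx
  simp only
  by_cases h0 : s0 ≤ e0 <;> by_cases h1 : s1 ≤ e1 <;>
    simp only [h0, h1, if_true, if_false] <;>
    simp only [PySem.List.pyRange_one, PySem.List.pyRange_neg_one] <;>
    rw [pv_zip_map_range, pv_foldl_append, List.nil_append]
  all_goals congr 1
  all_goals {
    first
    | (rw [show min (e0 - s0).toNat (e1 - s1).toNat = min (e0 - s0).natAbs (e1 - s1).natAbs by omega])
    | (rw [show min (e0 - s0).toNat (s1 - e1).toNat = min (e0 - s0).natAbs (e1 - s1).natAbs by omega])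
    | (rw [show min (s0 - e0).toNat (e1 - s1).toNat = min (e0 - s0).natAbs (e1 - s1).natAbs by omega])
    | (rw [show min (s0 - e0).toNat (s1 - e1).toNat = min (e0 - s0).natAbs (e1 - s1).natAbs by omega])
    apply List.map_congr_left
    intro i _
    simp
    try exact ⟨by ring, by ring⟩
    try ring
  }

theorem pv_walk_eq_canon :
    ∀ (n fuel : Nat) (s0 s1 e0 e1 : Int) (acc : List (Int × Int)),
      min (e0 - s0).natAbs (e1 - s1).natAbs = n → n < fuel →
      pvWalk fuel s0 s1 e0 e1 acc = acc ++ pvCanon s0 s1 e0 e1 := by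
  intro n
  induction n with
  | zero =>
    intro fuel s0 s1 e0 e1 acc hn hf
    obtain ⟨f, rfl⟩ : ∃ f, fuel = f + 1 := ⟨fuel - 1, by omega⟩
    rw [pvWalk]
    have : ¬ (s0 ≠ e0 ∧ s1 ≠ e1) := by omega
    rw [if_neg this]
    unfold pvCanon
    rw [hn]
    simp
  | succ n ih =>
    intro fuel s0 s1 e0 e1 acc hn hf
    obtain ⟨f, rfl⟩ : ∃ f, fuel = f + 1 := ⟨fuel - 1, by omega⟩
    have hx : s0 ≠ e0 := by omega
    have hy : s1 ≠ e1 := by omega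
    rw [pvWalk, if_pos ⟨hx, hy⟩]
    set x' := s0 + if s0 < e0 then (1 : Int) else -1 with hx'
    set y' := s1 + if s1 < e1 then (1 : Int) else -1 with hy'
    have hxv : x' = s0 + pvSx s0 e0 := by
      unfold pvSx; rw [hx']; split_ifs <;> omega
    have hyv : y' = s1 + pvSx s1 e1 := by
      unfold pvSx; rw [hy']; split_ifs <;> omega
    have hmin : min (e0 - x').natAbs (e1 - y').natAbs = n := by
      rw [hx', hy']; split_ifs <;> omega
    rw [ih f x' y' e0 e1 _ hmin (by omega), List.append_assoc]
    congr 1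
    -- [(s0, s1)] ++ pvCanon x' y' e0 e1 = pvCanon s0 s1 e0 e1
    unfold pvCanon
    rw [hn, hmin, List.range_succ_eq_map, List.map_cons, List.map_map]
    simp only [List.singleton_append, Nat.cast_zero, mul_zero, add_zero]
    congr 1
    apply List.map_congr_left
    intro i hi
    have hilt : i < n := List.mem_range.mp hi
    have hsx' : pvSx x' e0 = pvSx s0 e0 := by
      unfold pvSx
      rw [hx']
      have hne : x' ≠ e0 := by omega
      rw [hx'] at hne
      split_ifs <;> omega
    have hsy' : pvSx y' e1 = pvSx s1 e1 := by
      unfold pvSx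
      rw [hy']
      have hne : y' ≠ e1 := by omega
      rw [hy'] at hne
      split_ifs <;> omega
    simp only [Function.comp]
    rw [hsx', hsy', hxv, hyv]
    simp only [Prod.mk.injEq, Nat.succ_eq_add_one]
    push_cast
    constructor <;> ring

-- ===== VERDICT (by name: the statement is the Claim_ definition above) =====
theorem midle_coord_spec : Claim_equal_midle_coord := by
  intro ⟨s0, s1⟩ ⟨e0, e1⟩ _
  unfold Spec_midle_coord midle_coord_alt
  simp only
  rw [pv_walk_eq_canon (min (e0 - s0).natAbs (e1 - s1).natAbs) ((e0 - s0).natAbs + 1)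
      s0 s1 e0 e1 [] rfl (by omega),
    List.nil_append, pv_a_eq_canon]
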